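-- pv_equiv track=rewrite | github.com/ElenaKusevska/Python_exercises | pigs_and_chickens.py | solve
-- ===== SOURCE A (Python) =====
-- def solve(heads, legs):
--     x = 0
--     solution_found = False
--     for x in range(0,heads+1):
--         pigs = x
--         chickens = heads - x
--         if 4*pigs+2*chickens == legs:
--             solution_found = True
--             print ('pigs', pigs, 'chickens', chickens)
--             return pigs, chickens
--
--     if not solution_found:
--         print ('there is no possible solution to this system')
--         return None, None
-- ===== SOURCE B (Python) =====
-- def solve(heads, legs):
--     # Solve the linear system directly: pigs = (legs - 2*heads) / 2
--     t = legs - 2 * heads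
--     if t % 2 == 0:
--         pigs = t // 2
--         if 0 <= pigs <= heads:
--             print('pigs', pigs, 'chickens', heads - pigs)
--             return pigs, heads - pigs
--     print('there is no possible solution to this system')
--     return None, None
-- ===== Notes on version B (the rewrite author's own statement) =====
-- stated objective: faster
-- what changed: Replaces the O(heads) linear scan over range(heads+1) with the closed-form solution pigs=(legs-2*heads)//2 plus an integrality and bounds check.
import Mathlib
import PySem

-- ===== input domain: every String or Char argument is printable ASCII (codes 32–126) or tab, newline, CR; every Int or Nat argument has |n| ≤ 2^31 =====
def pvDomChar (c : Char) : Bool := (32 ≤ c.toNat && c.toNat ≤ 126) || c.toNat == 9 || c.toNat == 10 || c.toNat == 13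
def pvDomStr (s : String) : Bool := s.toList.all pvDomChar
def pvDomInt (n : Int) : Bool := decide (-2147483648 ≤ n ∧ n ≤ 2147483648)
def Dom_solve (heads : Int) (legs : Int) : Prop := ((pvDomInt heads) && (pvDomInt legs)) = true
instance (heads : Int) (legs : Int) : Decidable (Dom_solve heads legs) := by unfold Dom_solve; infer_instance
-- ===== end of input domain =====

-- B replaces A's O(heads) scan with the closed-form solution of the linear system (return value only; prints ignored).
-- ===== PORT A =====
def solveLoop (heads : Int) (legs : Int) : List Int → List (Option Int)
  | [] => [none, none]
  | x :: xs =>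
    if 4 * x + 2 * (heads - x) == legs then [some x, some (heads - x)]
    else solveLoop heads legs xs

def solve (heads : Int) (legs : Int) : List (Option Int) :=
  solveLoop heads legs (PySem.List.pyRange 0 (heads + 1) 1)

-- ===== PORT B =====
def solve_alt (heads : Int) (legs : Int) : List (Option Int) :=
  let t := legs - 2 * heads
  if PySem.Int.mod t 2 == 0 then
    let pigs := PySem.Int.floordiv t 2
    if 0 ≤ pigs ∧ pigs ≤ heads then [some pigs, some (heads - pigs)]
    else [none, none]
  else [none, none]

-- ===== PRECONDITION & SPEC =====
def Spec_solve (heads : Int) (legs : Int) (out : List (Option Int)) : Prop := out = solve_alt heads legs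
instance (heads : Int) (legs : Int) (out : List (Option Int)) : Decidable (Spec_solve heads legs out) := by unfold Spec_solve; infer_instance

-- ===== CLAIM (what is proved, stated in full; the proofs are below) =====
def Claim_equal_solve : Prop := ∀ (heads : Int) (legs : Int), Dom_solve heads legs → Spec_solve heads legs (solve heads legs)

-- ===== LEMMAS AND PROOFS =====

-- ===== VERDICT (by name: the statement is the Claim_ definition above) =====
-- If no element of the list satisfies the loop condition, the loop falls through.
theorem solveLoop_none (heads legs : Int) (L : List Int)
    (h : ∀ x ∈ L, 4 * x + 2 * (heads - x) ≠ legs) :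
    solveLoop heads legs L = [none, none] := by
  induction L with
  | nil => rfl
  | cons y ys ih =>
    simp only [solveLoop]
    rw [if_neg]
    · exact ih (fun x hx => h x (List.mem_cons_of_mem _ hx))
    · simpa using h y (List.mem_cons_self)

-- If p is in the list and the loop condition holds exactly at p, the loop returns p.
theorem solveLoop_found (heads legs p : Int) (L : List Int)
    (hmem : p ∈ L) (hiff : ∀ x, (4 * x + 2 * (heads - x) = legs) ↔ x = p) :
    solveLoop heads legs L = [some p, some (heads - p)] := by
  induction L with
  | nil => cases hmem
  | cons y ys ih =>
    simp only [solveLoop]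
    by_cases hy : 4 * y + 2 * (heads - y) = legs
    · have : y = p := (hiff y).mp hy
      subst this
      rw [if_pos (by simpa using hy)]
    · rw [if_neg (by simpa using hy)]
      rcases List.mem_cons.mp hmem with h | h
      · exact absurd ((hiff y).mpr h.symm) hy
      · exact ih h

theorem solve_spec : Claim_equal_solve := by
  intro heads legs _
  unfold Spec_solve solve solve_alt
  simp only []
  set t := legs - 2 * heads with ht
  by_cases heven : PySem.Int.mod t 2 = 0
  · have h2 : (2 : Int) ∣ t := (PySem.Int.mod_eq_zero_iff_dvd t 2).mp heven
    obtain ⟨p, hp⟩ := h2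
    have hfd : PySem.Int.floordiv t 2 = p := by
      rw [PySem.Int.floordiv_eq_ediv_of_pos (by omega), hp]
      omega
    rw [if_pos (by simpa using heven), hfd]
    by_cases hb : 0 ≤ p ∧ p ≤ heads
    · rw [if_pos hb]
      apply solveLoop_found
      · rw [PySem.List.mem_pyRange_one]; omega
      · intro x; omega
    · rw [if_neg hb]
      apply solveLoop_none
      intro x hx
      rw [PySem.List.mem_pyRange_one] at hx
      omega
  · rw [if_neg (by simpa using heven)]
    apply solveLoop_none
    intro x hx hc
    exact heven ((PySem.Int.mod_eq_zero_iff_dvd t 2).mpr ⟨x, by omega⟩)
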